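-- pv_equiv track=rewrite | github.com/UlugbekKodirov/ddmlab | k_mer_task/ngram_optimization/kmers_handlers.py | custom_nltk_ngrams_set
-- ===== SOURCE A (Python) =====
-- def custom_nltk_ngrams_set(seq, n):
--     """CUSTOM NLTK.NGRAMS - adding to set"""
--     sequence = iter(seq)
--     history = []
--     while n > 1:
--         try:
--             next_item = next(sequence)
--         except StopIteration:
--             # no more data, terminate the generator
--             return
--         history.append(next_item)
--         n -= 1
--     result = set()
--     for item in sequence:
--         history.append(item)
--         result.add("".join(history))
--         del history[0]
--     return result
-- ===== SOURCE B (Python) =====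
-- def custom_nltk_ngrams_set(seq, n):
--     """CUSTOM NLTK.NGRAMS - adding to set (index-slicing formulation)"""
--     items = list(seq)
--     k = max(n - 1, 0)  # number of context items preceding each emitted position
--     return {"".join(items[i - k:i + 1]) for i in range(k, len(items))}
-- ===== Notes on version B (the rewrite author's own statement) =====
-- stated objective: idiomatic
-- what changed: A maintains a sliding 'history' buffer over an iterator (fill loop, append, del history[0]); B materializes the list once and builds the set with a single comprehension over index slices; Pre_ excludes n > 1 with fewer than n-1 items, where A returns None instead of a set.
-- outside the precondition, e.g. on custom_nltk_ngrams_set(['a'], 3): A returns None, B returns set()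
import Mathlib
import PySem

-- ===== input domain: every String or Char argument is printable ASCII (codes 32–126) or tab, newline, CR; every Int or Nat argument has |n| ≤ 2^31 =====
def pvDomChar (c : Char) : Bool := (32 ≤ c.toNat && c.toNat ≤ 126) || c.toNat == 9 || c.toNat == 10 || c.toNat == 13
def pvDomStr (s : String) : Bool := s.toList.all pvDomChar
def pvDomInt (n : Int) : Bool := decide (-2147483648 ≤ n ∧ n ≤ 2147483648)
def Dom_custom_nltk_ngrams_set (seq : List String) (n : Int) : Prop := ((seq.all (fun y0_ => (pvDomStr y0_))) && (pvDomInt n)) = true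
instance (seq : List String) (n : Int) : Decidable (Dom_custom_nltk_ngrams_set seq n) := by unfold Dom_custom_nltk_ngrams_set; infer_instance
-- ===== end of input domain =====

-- B replaces A's iterator + sliding 'history' buffer by a set comprehension over index
-- slices of the materialized list (idiomatic; same cost). Pre_ excludes n > 1 with fewer
-- than n - 1 items, where A returns None (not a set).


-- ===== PORT A =====
-- the 'while n > 1' fill loop: none = StopIteration path ('return', i.e. Python returns None)
def pvFillA (rest : List String) (n : Int) (hist : List String) :
    Option (List String × List String) :=
  if _h : n > 1 then
    match rest with
    | [] => none
    | x :: xs => pvFillA xs (n - 1) (hist ++ [x])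
  else some (hist, rest)
termination_by n.toNat
decreasing_by omega

-- the 'for item in sequence' loop
def pvLoopA (rest : List String) (hist : List String) (result : PySem.Set String) :
    PySem.Set String :=
  match rest with
  | [] => result
  | x :: xs =>
      pvLoopA xs ((hist ++ [x]).drop 1)
        (PySem.Set.add result (PySem.Str.join "" (hist ++ [x])))

def custom_nltk_ngrams_set (seq : List String) (n : Int) : List String :=
  match pvFillA seq n [] with
  | none => []  -- Python A returns None here; excluded by Pre_
  | some (hist, rest) => pvLoopA rest hist PySem.Set.empty

-- ===== PORT B =====
def custom_nltk_ngrams_set_alt (seq : List String) (n : Int) : List String :=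
  let items := seq
  let k : Int := max (n - 1) 0
  PySem.Set.ofList
    ((PySem.List.pyRange k (items.length : Int) 1).map
      (fun i => PySem.Str.join "" (PySem.List.slice items (some (i - k)) (some (i + 1)))))

-- ===== PRECONDITION & SPEC =====
-- Pre_ excludes exactly the inputs on which Python A returns None instead of a set
-- (n > 1 with fewer than n - 1 items); B returns the empty set there.
def Pre_custom_nltk_ngrams_set (seq : List String) (n : Int) : Prop :=
  ¬ (n > 1 ∧ (seq.length : Int) < n - 1)
instance (seq : List String) (n : Int) : Decidable (Pre_custom_nltk_ngrams_set seq n) := by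
  unfold Pre_custom_nltk_ngrams_set; infer_instance

def pvWitness_custom_nltk_ngrams_set : List String × Int := (["ab", "c", "d"], 2)

def Spec_custom_nltk_ngrams_set (seq : List String) (n : Int) (out : List String) : Prop := out = custom_nltk_ngrams_set_alt seq n
instance (seq : List String) (n : Int) (out : List String) : Decidable (Spec_custom_nltk_ngrams_set seq n out) := by unfold Spec_custom_nltk_ngrams_set; infer_instance

-- ===== CLAIM (what is proved, stated in full; the proofs are below) =====
def Claim_equal_custom_nltk_ngrams_set : Prop := ∀ (seq : List String) (n : Int), Dom_custom_nltk_ngrams_set seq n → Pre_custom_nltk_ngrams_set seq n → Spec_custom_nltk_ngrams_set seq n (custom_nltk_ngrams_set seq n)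

-- ===== LEMMAS AND PROOFS =====

-- the fill loop consumes the first (n-1).toNat items when enough are there
theorem pvFillA_spec (rest : List String) (n : Int) (hist : List String)
    (h : (n - 1).toNat ≤ rest.length) :
    pvFillA rest n hist =
      some (hist ++ rest.take (n - 1).toNat, rest.drop (n - 1).toNat) := by
  induction rest generalizing n hist with
  | nil =>
      have hn : ¬ n > 1 := by simp at h; omega
      rw [pvFillA.eq_def]
      simp [hn]
  | cons x xs ih =>
      by_cases hn : n > 1
      · have h' : (n - 1 - 1).toNat ≤ xs.length := by simp at h ⊢; omega
        rw [pvFillA.eq_def]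
        simp only [hn, dite_true]
        rw [ih (n - 1) (hist ++ [x]) h']
        have ht : (n - 1).toNat = (n - 1 - 1).toNat + 1 := by omega
        simp only [ht, List.take_succ_cons, List.drop_succ_cons, List.append_assoc, List.singleton_append]
      · have ht : (n - 1).toNat = 0 := by omega
        rw [pvFillA.eq_def]
        simp only [hn, dite_false, ht, List.take_zero, List.drop_zero, List.append_nil]

-- the main loop = folding Set.add over the window joins, windows taken by index
theorem pvLoopA_spec (rest : List String) (hist : List String) (s : PySem.Set String) :
    pvLoopA rest hist s =
      ((List.range rest.length).map
        (fun i => PySem.Str.join "" (((hist ++ rest).drop i).take (hist.length + 1)))).foldl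
        PySem.Set.add s := by
  induction rest generalizing hist s with
  | nil => simp [pvLoopA]
  | cons x xs ih =>
      rw [pvLoopA, ih]
      simp only [List.length_cons]
      rw [List.range_succ_eq_map]
      simp only [List.map_cons, List.map_map, List.foldl_cons]
      congr 1
      · congr 2
        simp only [List.drop_zero]
        rw [List.take_append]
        simp
      · apply List.map_congr_left
        intro i _
        have h1 : (hist ++ [x]).drop 1 ++ xs = (hist ++ x :: xs).drop 1 := by
          cases hist; simp; simp
        have h2 : ((hist ++ [x]).drop 1).length = hist.length := by simp
        simp only [Function.comp]
        rw [h2, h1, List.drop_drop, Nat.add_comm 1 i, Nat.succ_eq_add_one]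

theorem custom_nltk_ngrams_set_spec : Claim_equal_custom_nltk_ngrams_set := by
  intro seq n _ hpre
  unfold Pre_custom_nltk_ngrams_set at hpre
  unfold Spec_custom_nltk_ngrams_set
  unfold custom_nltk_ngrams_set custom_nltk_ngrams_set_alt
  by_cases hn : n > 1
  · have hlen : (n - 1).toNat ≤ seq.length := by omega
    rw [pvFillA_spec seq n [] hlen]
    simp only [List.nil_append]
    rw [pvLoopA_spec, List.take_append_drop, PySem.Set.ofList_eq_foldl]
    congr 1
    have hk : max (n - 1) 0 = n - 1 := by omega
    rw [hk, PySem.List.pyRange_one, List.map_map]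
    have hcount : ((seq.length : Int) - (n - 1)).toNat = (seq.drop (n - 1).toNat).length := by
      simp; omega
    rw [hcount]
    apply List.map_congr_left
    intro i hi
    simp only [Function.comp]
    have hstart : (n - 1) + (i : Int) - (n - 1) = ((i : Nat) : Int) := by omega
    have hend : (n - 1) + (i : Int) + 1 = ((i : Nat) : Int) + ((n.toNat : Nat) : Int) := by omega
    rw [hstart, hend, PySem.List.slice_natCast_add]
    have hone : (n - 1).toNat + 1 = n.toNat := by omega
    rw [List.length_take, Nat.min_eq_left hlen, hone]
  · -- n ≤ 1: history stays empty, window size 1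
    rw [pvFillA.eq_def]
    simp only [hn, dite_false]
    rw [pvLoopA_spec, PySem.Set.ofList_eq_foldl]
    congr 1
    have hk : max (n - 1) 0 = 0 := by omega
    rw [hk, PySem.List.pyRange_zero_nat, List.map_map]
    apply List.map_congr_left
    intro i hi
    simp only [Function.comp, List.nil_append, List.length_nil]
    have hstart : ((i : Nat) : Int) - 0 = ((i : Nat) : Int) := by omega
    have hend : ((i : Nat) : Int) + 1 = ((i : Nat) : Int) + (((1 : Nat)) : Int) := by norm_num
    rw [hstart, hend, PySem.List.slice_natCast_add]
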